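-- pv_equiv track=rewrite | github.com/lcsteinberg1129/pythonProjects | take_sample.py | negative_reasons
-- ===== SOURCE A (Python) =====
-- def negative_reasons(negativearray, redesignationG, refund, reattribution, redesignationPG):
--     for reason in negativearray:
--         if reason == 'REDESIGNATION TO GENERAL':
--             redesignationG+=1
--         if reason == 'Refund':
--             refund+=1
--         if reason == 'REATTRIBUTION TO SPOUSE':
--             reattribution+=1
--         if reason == 'REDESIGNATION TO PRESIDENTIAL GENERAL':
--             redesignationPG+=1
--
--     return redesignationG, refund, reattribution, redesignationPG
-- ===== SOURCE B (Python) =====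
-- def negative_reasons(negativearray, redesignationG, refund, reattribution, redesignationPG):
--     counts = {}
--     for reason in negativearray:
--         counts[reason] = counts.get(reason, 0) + 1
--     return (redesignationG + counts.get('REDESIGNATION TO GENERAL', 0),
--             refund + counts.get('Refund', 0),
--             reattribution + counts.get('REATTRIBUTION TO SPOUSE', 0),
--             redesignationPG + counts.get('REDESIGNATION TO PRESIDENTIAL GENERAL', 0))
-- ===== Notes on version B (the rewrite author's own statement) =====
-- stated objective: idiomatic
-- what changed: B builds one frequency table (a dict maintained per distinct reason) in a single pass and returns each accumulator plus a table lookup, instead of A's four scalar accumulators each updated under its own equality branch inside the loop.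
import Mathlib
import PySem

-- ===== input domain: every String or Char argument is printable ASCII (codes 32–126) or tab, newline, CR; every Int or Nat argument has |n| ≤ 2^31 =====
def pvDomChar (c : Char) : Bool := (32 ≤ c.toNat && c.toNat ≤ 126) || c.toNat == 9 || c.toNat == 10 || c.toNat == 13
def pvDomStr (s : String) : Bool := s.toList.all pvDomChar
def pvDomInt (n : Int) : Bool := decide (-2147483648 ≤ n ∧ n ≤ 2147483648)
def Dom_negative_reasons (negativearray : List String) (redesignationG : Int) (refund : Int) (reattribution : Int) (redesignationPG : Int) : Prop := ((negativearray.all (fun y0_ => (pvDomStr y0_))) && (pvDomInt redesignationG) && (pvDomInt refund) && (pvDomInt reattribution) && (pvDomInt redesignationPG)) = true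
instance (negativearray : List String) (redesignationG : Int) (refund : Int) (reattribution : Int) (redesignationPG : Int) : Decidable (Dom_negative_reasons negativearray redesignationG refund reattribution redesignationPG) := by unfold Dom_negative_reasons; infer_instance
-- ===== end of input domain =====

-- B replaces A's four scalar accumulators with one frequency table built in a single pass, then adds a lookup per reason (idiomatic, same cost).


-- ===== PORT A =====
-- Loop over the list; four independent equality branches each bump their scalar accumulator.
def negative_reasons (negativearray : List String) (redesignationG : Int) (refund : Int) (reattribution : Int) (redesignationPG : Int) : Int × Int × Int × Int :=
  match negativearray with
  | [] => (redesignationG, refund, reattribution, redesignationPG)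
  | reason :: rest =>
    let redesignationG := if reason = "REDESIGNATION TO GENERAL" then redesignationG + 1 else redesignationG
    let refund := if reason = "Refund" then refund + 1 else refund
    let reattribution := if reason = "REATTRIBUTION TO SPOUSE" then reattribution + 1 else reattribution
    let redesignationPG := if reason = "REDESIGNATION TO PRESIDENTIAL GENERAL" then redesignationPG + 1 else redesignationPG
    negative_reasons rest redesignationG refund reattribution redesignationPG

-- ===== PORT B =====
-- B: build one frequency table in a single pass, then return accumulator + lookup for each reason.
-- counts[reason] = counts.get(reason, 0) + 1  is exactly Dict.modify reason 0 (+1).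
def negative_reasons_alt (negativearray : List String) (redesignationG : Int) (refund : Int) (reattribution : Int) (redesignationPG : Int) : Int × Int × Int × Int :=
  let counts : PySem.Dict String Int :=
    negativearray.foldl (fun counts reason => counts.modify reason 0 (· + 1)) PySem.Dict.empty
  (redesignationG + counts.getD "REDESIGNATION TO GENERAL" 0,
   refund + counts.getD "Refund" 0,
   reattribution + counts.getD "REATTRIBUTION TO SPOUSE" 0,
   redesignationPG + counts.getD "REDESIGNATION TO PRESIDENTIAL GENERAL" 0)

-- ===== PRECONDITION & SPEC =====
def Spec_negative_reasons (negativearray : List String) (redesignationG : Int) (refund : Int) (reattribution : Int) (redesignationPG : Int) (out : Int × Int × Int × Int) : Prop := out = negative_reasons_alt negativearray redesignationG refund reattribution redesignationPG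
instance (negativearray : List String) (redesignationG : Int) (refund : Int) (reattribution : Int) (redesignationPG : Int) (out : Int × Int × Int × Int) : Decidable (Spec_negative_reasons negativearray redesignationG refund reattribution redesignationPG out) := by unfold Spec_negative_reasons; infer_instance

-- ===== CLAIM (what is proved, stated in full; the proofs are below) =====
def Claim_equal_negative_reasons : Prop := ∀ (negativearray : List String) (redesignationG : Int) (refund : Int) (reattribution : Int) (redesignationPG : Int), Dom_negative_reasons negativearray redesignationG refund reattribution redesignationPG → Spec_negative_reasons negativearray redesignationG refund reattribution redesignationPG (negative_reasons negativearray redesignationG refund reattribution redesignationPG)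

-- ===== LEMMAS AND PROOFS =====

-- B's table lookup is the list count.
theorem alt_eq_counts (negativearray : List String) (g r a p : Int) :
    negative_reasons_alt negativearray g r a p =
      (g + (negativearray.count "REDESIGNATION TO GENERAL" : Int),
       r + (negativearray.count "Refund" : Int),
       a + (negativearray.count "REATTRIBUTION TO SPOUSE" : Int),
       p + (negativearray.count "REDESIGNATION TO PRESIDENTIAL GENERAL" : Int)) := by
  have h : ∀ s : String,
      (negativearray.foldl (fun counts reason => counts.modify reason 0 (· + 1))
        PySem.Dict.empty).getD s 0 = (negativearray.count s : Int) :=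
    fun s => PySem.Dict.getD_counter negativearray s
  simp [negative_reasons_alt, h]

-- A's loop computes the same four counts, by induction generalizing the accumulators.
theorem a_eq_counts (negativearray : List String) (g r a p : Int) :
    negative_reasons negativearray g r a p =
      (g + (negativearray.count "REDESIGNATION TO GENERAL" : Int),
       r + (negativearray.count "Refund" : Int),
       a + (negativearray.count "REATTRIBUTION TO SPOUSE" : Int),
       p + (negativearray.count "REDESIGNATION TO PRESIDENTIAL GENERAL" : Int)) := by
  induction negativearray generalizing g r a p with
  | nil => simp [negative_reasons]
  | cons x xs ih =>
    simp only [negative_reasons, ih, List.count_cons]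
    split_ifs <;> simp_all <;> omega

-- ===== VERDICT (by name: the statement is the Claim_ definition above) =====
theorem negative_reasons_spec : Claim_equal_negative_reasons := by
  intro negativearray g r a p _
  unfold Spec_negative_reasons
  rw [alt_eq_counts, a_eq_counts]
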